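-- pv_equiv track=rewrite | github.com/dokimiki/flutter-mcp | src/flutter_mcp/server.py | filter_documentation_by_topic
-- ===== SOURCE A (Python) =====
-- def filter_documentation_by_topic(content: str, topic: str, doc_type: str) -> str:
--     """Filter documentation content by topic"""
--     topic_lower = topic.lower()
--
--     if doc_type in ["flutter_class", "dart_class"]:
--         # Class documentation topics
--         lines = content.split('\n')
--         filtered_lines = []
--         current_section = None
--         include_section = False
--
--         for line in lines:
--             # Detect section headers
--             if line.startswith('## '):
--                 section_name = line[3:].lower()
--                 current_section = section_name
--
--                 # Determine if we should include this section
--                 if topic_lower == "constructors" and "constructor" in section_name: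
--                     include_section = True
--                 elif topic_lower == "methods" and "method" in section_name:
--                     include_section = True
--                 elif topic_lower == "properties" and "propert" in section_name:
--                     include_section = True
--                 elif topic_lower == "examples" and ("example" in section_name or "code" in section_name):
--                     include_section = True
--                 else:
--                     include_section = False
--
--             # Always include the class name and description
--             if line.startswith('# ') or (current_section == "description" and not line.startswith('## ')):
--                 filtered_lines.append(line)
--             elif include_section:
--                 filtered_lines.append(line)
--
--         return '\n'.join(filtered_lines)
--
--     return content
-- ===== SOURCE B (Python) =====
-- def _matches(topic_lower, name):
--     return ((topic_lower == "constructors" and "constructor" in name)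
--             or (topic_lower == "methods" and "method" in name)
--             or (topic_lower == "properties" and "propert" in name)
--             or (topic_lower == "examples" and ("example" in name or "code" in name)))
--
--
-- def _split_blocks(lines):
--     """Split lines into (preamble, blocks); each block is ('## ' header, body lines).
--
--     Built back-to-front: scanning from the end, a header captures the lines
--     collected so far as its body."""
--     pre, blocks = [], []
--     for line in reversed(lines):
--         if line.startswith('## '):
--             blocks = [(line, pre)] + blocks
--             pre = []
--         else:
--             pre = [line] + pre
--     return pre, blocks
--
--
-- def filter_documentation_by_topic(content: str, topic: str, doc_type: str) -> str:
--     """Filter documentation content by topic"""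
--     if doc_type not in ["flutter_class", "dart_class"]:
--         return content
--     topic_lower = topic.lower()
--     pre, blocks = _split_blocks(content.split('\n'))
--     out = [l for l in pre if l.startswith('# ')]
--     for header, body in blocks:
--         name = header[3:].lower()
--         if _matches(topic_lower, name):
--             out.append(header)
--             out.extend(body)
--         elif name == "description":
--             out.extend(body)
--         else:
--             out.extend(l for l in body if l.startswith('# '))
--     return '\n'.join(out)
-- ===== Notes on version B (the rewrite author's own statement) =====
-- stated objective: alternative
-- what changed: Replaced A's single line-by-line state machine (carrying current_section/include_section flags) by a two-phase decomposition: split the lines into a preamble plus '## '-headed section blocks, then render each block (whole block if its name matches the topic, body only for the 'description' section, otherwise just its '# ' lines).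
import Mathlib
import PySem

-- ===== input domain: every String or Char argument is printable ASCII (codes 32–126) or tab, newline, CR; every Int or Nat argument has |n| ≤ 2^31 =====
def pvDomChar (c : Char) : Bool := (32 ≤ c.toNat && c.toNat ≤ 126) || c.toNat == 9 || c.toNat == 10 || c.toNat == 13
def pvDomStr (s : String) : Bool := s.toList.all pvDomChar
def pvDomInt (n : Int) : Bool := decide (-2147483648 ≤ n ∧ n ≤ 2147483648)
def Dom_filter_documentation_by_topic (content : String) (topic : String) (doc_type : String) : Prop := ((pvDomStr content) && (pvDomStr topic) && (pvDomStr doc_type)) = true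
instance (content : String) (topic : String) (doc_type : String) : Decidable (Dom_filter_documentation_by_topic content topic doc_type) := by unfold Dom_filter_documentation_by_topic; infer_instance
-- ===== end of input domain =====

-- B re-decomposes A's line-by-line state machine into split-into-sections + render-per-section
-- (objective: alternative decomposition, same cost); equivalence of the return value is proved below.

-- ===== PORT A =====
-- A's if/elif chain deciding whether a just-seen '## ' section header matches the topic.
def fdbtMatchA (t name : List Char) : Bool :=
  if t == "constructors".toList && PySem.Chars.isIn "constructor".toList name then true
  else if t == "methods".toList && PySem.Chars.isIn "method".toList name then true
  else if t == "properties".toList && PySem.Chars.isIn "propert".toList name then true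
  else if t == "examples".toList &&
      (PySem.Chars.isIn "example".toList name || PySem.Chars.isIn "code".toList name) then true
  else false

-- A's `for line in lines` loop, carrying (current_section, include_section) as state.
def fdbtLoop (t : List Char) : List (List Char) → Option (List Char) → Bool → List (List Char)
  | [], _, _ => []
  | l :: ls, cur, inc =>
    let st :=
      if PySem.Chars.startswith l "## ".toList then
        let name := PySem.Chars.lower (PySem.List.slice l (some 3) none)
        (some name, fdbtMatchA t name)
      else (cur, inc)
    let keep := PySem.Chars.startswith l "# ".toList ||
      ((st.1 == some "description".toList) && !PySem.Chars.startswith l "## ".toList) || st.2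
    (if keep then [l] else []) ++ fdbtLoop t ls st.1 st.2

def filter_documentation_by_topic (content : String) (topic : String) (doc_type : String) : String :=
  let topic_lower := PySem.Chars.lower topic.toList
  if doc_type == "flutter_class" || doc_type == "dart_class" then
    let lines := PySem.Chars.splitOn content.toList "\n".toList
    String.ofList (PySem.Chars.join "\n".toList (fdbtLoop topic_lower lines none false))
  else content

-- ===== PORT B =====
-- B's boolean-expression form of the topic test.
def fdbtMatchB (t name : List Char) : Bool :=
  (t == "constructors".toList && PySem.Chars.isIn "constructor".toList name) ||
  (t == "methods".toList && PySem.Chars.isIn "method".toList name) ||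
  (t == "properties".toList && PySem.Chars.isIn "propert".toList name) ||
  (t == "examples".toList &&
    (PySem.Chars.isIn "example".toList name || PySem.Chars.isIn "code".toList name))

-- B's _split_blocks: back-to-front, a '## ' header captures the lines gathered so far as its body.
def fdbtSplit : List (List Char) → List (List Char) × List (List Char × List (List Char))
  | [] => ([], [])
  | l :: ls =>
    let r := fdbtSplit ls
    if PySem.Chars.startswith l "## ".toList then ([], (l, r.1) :: r.2) else (l :: r.1, r.2)

-- B's section-name helper: name = header[3:].lower()
def fdbtName (l : List Char) : List Char := PySem.Chars.lower (PySem.List.slice l (some 3) none)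

-- B's per-block rendering.
def fdbtRender (t : List Char) (b : List Char × List (List Char)) : List (List Char) :=
  if fdbtMatchB t (fdbtName b.1) then b.1 :: b.2
  else if fdbtName b.1 == "description".toList then b.2
  else b.2.filter (fun l => PySem.Chars.startswith l "# ".toList)

def filter_documentation_by_topic_alt (content : String) (topic : String) (doc_type : String) : String :=
  if doc_type == "flutter_class" || doc_type == "dart_class" then
    let topic_lower := PySem.Chars.lower topic.toList
    let p := fdbtSplit (PySem.Chars.splitOn content.toList "\n".toList)
    String.ofList (PySem.Chars.join "\n".toList
      (p.1.filter (fun l => PySem.Chars.startswith l "# ".toList) ++ p.2.flatMap (fdbtRender topic_lower)))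
  else content

-- ===== PRECONDITION & SPEC =====
def Spec_filter_documentation_by_topic (content : String) (topic : String) (doc_type : String) (out : String) : Prop := out = filter_documentation_by_topic_alt content topic doc_type
instance (content : String) (topic : String) (doc_type : String) (out : String) : Decidable (Spec_filter_documentation_by_topic content topic doc_type out) := by unfold Spec_filter_documentation_by_topic; infer_instance

-- ===== CLAIM (what is proved, stated in full; the proofs are below) =====
def Claim_equal_filter_documentation_by_topic : Prop := ∀ (content : String) (topic : String) (doc_type : String), Dom_filter_documentation_by_topic content topic doc_type → Spec_filter_documentation_by_topic content topic doc_type (filter_documentation_by_topic content topic doc_type)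

-- ===== LEMMAS AND PROOFS =====

-- the line-admission test A applies while in state (cur, inc)
def fdbtKeep (cur : Option (List Char)) (inc : Bool) (l : List Char) : Bool :=
  PySem.Chars.startswith l "# ".toList ||
    ((cur == some "description".toList) && !PySem.Chars.startswith l "## ".toList) || inc

theorem fdbtMatch_eq (t name : List Char) : fdbtMatchA t name = fdbtMatchB t name := by
  unfold fdbtMatchA fdbtMatchB
  split_ifs <;> simp_all

theorem header_not_sharp (l : List Char)
    (h : PySem.Chars.startswith l ['#', '#', ' '] = true) :
    PySem.Chars.startswith l ['#', ' '] = false := by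
  rw [show (['#', '#', ' '] = "## ".toList) from rfl, PySem.Chars.startswith_iff] at h
  obtain ⟨r, hr⟩ := h
  subst hr
  simp [PySem.Chars.startswith, List.isPrefixOf]

theorem split_cons_header (l : List Char) (ls : List (List Char))
    (h : PySem.Chars.startswith l ['#', '#', ' '] = true) :
    fdbtSplit (l :: ls) = ([], (l, (fdbtSplit ls).1) :: (fdbtSplit ls).2) := by
  simp [fdbtSplit, h]

theorem split_cons_plain (l : List Char) (ls : List (List Char))
    (h : PySem.Chars.startswith l ['#', '#', ' '] = false) :
    fdbtSplit (l :: ls) = (l :: (fdbtSplit ls).1, (fdbtSplit ls).2) := by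
  simp [fdbtSplit, h]

theorem split_pre_no_header (ls : List (List Char)) :
    ∀ l ∈ (fdbtSplit ls).1, PySem.Chars.startswith l ['#', '#', ' '] = false := by
  induction ls with
  | nil => simp [fdbtSplit]
  | cons l ls ih =>
    intro x hx
    by_cases h : PySem.Chars.startswith l ['#', '#', ' '] = true
    · rw [split_cons_header l ls h] at hx
      simp at hx
    · have h' := eq_false_of_ne_true h
      rw [split_cons_plain l ls h'] at hx
      rcases List.mem_cons.mp hx with rfl | hx'
      · exact h'
      · exact ih x hx'

theorem loop_cons_header (t l : List Char) (ls : List (List Char))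
    (cur : Option (List Char)) (inc : Bool)
    (h : PySem.Chars.startswith l ['#', '#', ' '] = true) :
    fdbtLoop t (l :: ls) cur inc =
      (if fdbtMatchA t (fdbtName l) = true then [l] else []) ++
        fdbtLoop t ls (some (fdbtName l)) (fdbtMatchA t (fdbtName l)) := by
  simp [fdbtLoop, fdbtName, h, header_not_sharp l h]

theorem loop_cons_plain (t l : List Char) (ls : List (List Char))
    (cur : Option (List Char)) (inc : Bool)
    (h : PySem.Chars.startswith l ['#', '#', ' '] = false) :
    fdbtLoop t (l :: ls) cur inc =
      (if fdbtKeep cur inc l = true then [l] else []) ++ fdbtLoop t ls cur inc := by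
  simp [fdbtLoop, fdbtKeep, h]

theorem render_match (t l : List Char) (pre : List (List Char))
    (hm : fdbtMatchB t (fdbtName l) = true) :
    fdbtRender t (l, pre) = l :: pre := by
  simp [fdbtRender, hm]

theorem render_desc (t l : List Char) (pre : List (List Char))
    (hm : fdbtMatchB t (fdbtName l) = false)
    (hd : fdbtName l = ['d', 'e', 's', 'c', 'r', 'i', 'p', 't', 'i', 'o', 'n']) :
    fdbtRender t (l, pre) = pre := by
  rw [hd] at hm
  simp [fdbtRender, hd, hm]

theorem render_other (t l : List Char) (pre : List (List Char))
    (hm : fdbtMatchB t (fdbtName l) = false)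
    (hd : ¬ fdbtName l = ['d', 'e', 's', 'c', 'r', 'i', 'p', 't', 'i', 'o', 'n']) :
    fdbtRender t (l, pre) = pre.filter (fun x => PySem.Chars.startswith x "# ".toList) := by
  simp [fdbtRender, hm, hd]

theorem loop_eq_split (t : List Char) (ls : List (List Char)) :
    ∀ (cur : Option (List Char)) (inc : Bool),
      fdbtLoop t ls cur inc =
        (fdbtSplit ls).1.filter (fdbtKeep cur inc) ++ (fdbtSplit ls).2.flatMap (fdbtRender t) := by
  induction ls with
  | nil => intro cur inc; simp [fdbtLoop, fdbtSplit]
  | cons l ls ih =>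
    intro cur inc
    by_cases h : PySem.Chars.startswith l ['#', '#', ' '] = true
    · -- header line: it opens a new section; its body is the pre of the tail split
      have hpre := split_pre_no_header ls
      rw [loop_cons_header t l ls cur inc h, split_cons_header l ls h, ih, fdbtMatch_eq]
      by_cases hm : fdbtMatchB t (fdbtName l) = true
      · -- matching section: header and whole body are kept
        have hall : ∀ x ∈ (fdbtSplit ls).1, fdbtKeep (some (fdbtName l)) true x = true := by
          intro x _; simp [fdbtKeep]
        simp [hm, render_match t l _ hm, List.filter_eq_self.mpr hall]
      · have hm' := eq_false_of_ne_true hm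
        by_cases hd : fdbtName l = ['d', 'e', 's', 'c', 'r', 'i', 'p', 't', 'i', 'o', 'n']
        · -- description section: body kept, header dropped
          have hall : ∀ x ∈ (fdbtSplit ls).1, fdbtKeep (some (fdbtName l)) false x = true := by
            intro x hx
            simp [fdbtKeep, hd, hpre x hx]
          simp [hm', render_desc t l _ hm' hd, List.filter_eq_self.mpr hall]
        · -- other section: only '# ' body lines kept
          have heq : ∀ x ∈ (fdbtSplit ls).1,
              fdbtKeep (some (fdbtName l)) false x = PySem.Chars.startswith x "# ".toList := by
            intro x hx
            simp [fdbtKeep, hd]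
          simp [hm', render_other t l _ hm' hd, List.filter_congr heq]
    · -- ordinary line: state unchanged, the line joins the pre of the split
      have h' := eq_false_of_ne_true h
      rw [loop_cons_plain t l ls cur inc h', split_cons_plain l ls h', ih]
      simp only [List.filter_cons]
      by_cases hk : fdbtKeep cur inc l = true
      · simp only [hk, if_true, List.cons_append, List.nil_append]
      · simp only [eq_false_of_ne_true hk, Bool.false_eq_true, if_false, List.nil_append]

theorem keep_none_false (l : List Char) :
    fdbtKeep none false l = PySem.Chars.startswith l "# ".toList := by
  simp [fdbtKeep]

-- ===== VERDICT (by name: the statement is the Claim_ definition above) =====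
theorem filter_documentation_by_topic_spec : Claim_equal_filter_documentation_by_topic := by
  intro content topic doc_type _
  unfold Spec_filter_documentation_by_topic
  unfold filter_documentation_by_topic filter_documentation_by_topic_alt
  by_cases h : (doc_type == "flutter_class" || doc_type == "dart_class") = true
  · simp only [h, if_true]
    rw [loop_eq_split]
    rw [List.filter_congr (fun x _ => keep_none_false x)]
  · simp [eq_false_of_ne_true h]
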